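-- pv_equiv track=rewrite | github.com/Radeox/advent-of-code-2021 | Day-10/solution_part2.py | get_incomplete_lines
-- ===== SOURCE A (Python) =====
-- def is_corrupted(char1, char2):
--     return (
--         (char1 != '(' or char2 != ')')
--         and (char1 != '[' or char2 != ']')
--         and (char1 != '{' or char2 != '}')
--         and (char1 != '<' or char2 != '>')
--     )
--
-- def get_incomplete_lines(lines):
--     rv = []
--
--     for line in lines:
--         corrupted = False
--         stack = []
--
--         for char in line:
--             if char in ['(', '[', '{', '<']:
--                 stack.append(char)
--             elif char in [')', ']', '}', '>']:
--                 if not stack or is_corrupted(stack.pop(), char):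
--                     corrupted = True
--
--         if not corrupted:
--             rv.append(line)
--     return rv
-- ===== SOURCE B (Python) =====
-- def get_incomplete_lines(lines):
--     rv = []
--     for line in lines:
--         s = ''.join(c for c in line if c in '()[]{}<>')
--         while True:
--             t = s.replace('()', '').replace('[]', '').replace('{}', '').replace('<>', '')
--             if t == s:
--                 break
--             s = t
--         if not any(c in s for c in ')]}>'):
--             rv.append(line)
--     return rv
-- ===== Notes on version B (the rewrite author's own statement) =====
-- stated objective: alternative
-- what changed: Replaces the single-pass stack scan with filtering to bracket characters and iterated elimination of adjacent matching pairs (str.replace to a fixpoint); a line is kept iff no closing bracket survives the reduction.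
import Mathlib
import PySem

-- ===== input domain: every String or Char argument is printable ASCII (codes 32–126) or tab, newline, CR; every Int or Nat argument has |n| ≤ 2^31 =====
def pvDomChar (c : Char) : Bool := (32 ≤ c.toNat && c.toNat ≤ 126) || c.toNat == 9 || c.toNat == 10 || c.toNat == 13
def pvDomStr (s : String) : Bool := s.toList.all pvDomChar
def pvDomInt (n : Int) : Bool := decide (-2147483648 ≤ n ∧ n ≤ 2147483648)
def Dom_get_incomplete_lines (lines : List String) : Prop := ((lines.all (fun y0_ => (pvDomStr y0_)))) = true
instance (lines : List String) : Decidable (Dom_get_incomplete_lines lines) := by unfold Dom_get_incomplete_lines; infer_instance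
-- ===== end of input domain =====

-- B keeps a line iff iterated deletion of adjacent matching bracket pairs (after dropping
-- non-bracket chars) leaves no closing bracket, instead of A's single-pass stack scan; objective: alternative.

-- ===== PORT A =====
def is_corrupted (char1 char2 : Char) : Bool :=
  (char1 != '(' || char2 != ')') &&
  (char1 != '[' || char2 != ']') &&
  (char1 != '{' || char2 != '}') &&
  (char1 != '<' || char2 != '>')

-- one step of A's inner loop; state = (corrupted, stack) with stack top at the head
def stepA (st : Bool × List Char) (c : Char) : Bool × List Char :=
  if c = '(' ∨ c = '[' ∨ c = '{' ∨ c = '<' then (st.1, c :: st.2)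
  else if c = ')' ∨ c = ']' ∨ c = '}' ∨ c = '>' then
    match st.2 with
    | [] => (true, [])
    | t :: rest => (st.1 || is_corrupted t c, rest)
  else st

def get_incomplete_lines (lines : List String) : List String :=
  lines.foldl (fun rv line =>
    if (line.toList.foldl stepA (false, [])).1 then rv else rv ++ [line]) []

-- ===== PORT B =====
-- Python `c in '()[]{}<>'`
def isBracket (c : Char) : Bool := ['(', ')', '[', ']', '{', '}', '<', '>'].contains c

-- Python s.replace(o+c, '') for a two-character pattern: left-to-right removal of occurrences
def replacePair (o c : Char) : List Char → List Char
  | [] => []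
  | [x] => [x]
  | x :: y :: t => if x = o ∧ y = c then replacePair o c t else x :: replacePair o c (y :: t)

def reduceOnce (s : List Char) : List Char :=
  replacePair '<' '>' (replacePair '{' '}' (replacePair '[' ']' (replacePair '(' ')' s)))

theorem replacePair_sublist (o c : Char) : ∀ s : List Char, (replacePair o c s).Sublist s
  | [] => List.Sublist.refl _
  | [x] => List.Sublist.refl _
  | x :: y :: t => by
    unfold replacePair
    split
    · exact ((replacePair_sublist o c t).trans (List.sublist_cons_self y t)).trans
        (List.sublist_cons_self x (y :: t))
    · exact List.Sublist.cons₂ x (replacePair_sublist o c (y :: t))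

theorem reduceOnce_sublist (s : List Char) : (reduceOnce s).Sublist s :=
  ((((replacePair_sublist _ _ _).trans (replacePair_sublist _ _ _)).trans
    (replacePair_sublist _ _ _)).trans (replacePair_sublist _ _ _))

-- Python's `while True: t = …; if t == s: break; s = t`
def reduce (s : List Char) : List Char :=
  if reduceOnce s = s then s else reduce (reduceOnce s)
termination_by s.length
decreasing_by
  exact Nat.lt_of_le_of_ne ((reduceOnce_sublist s).length_le)
    (fun h => ‹¬ _› ((reduceOnce_sublist s).eq_of_length h))

def get_incomplete_lines_alt (lines : List String) : List String :=
  lines.foldl (fun rv line =>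
    let s := reduce (line.toList.filter isBracket)
    if [')', ']', '}', '>'].any (fun c => s.contains c) then rv else rv ++ [line]) []

-- ===== PRECONDITION & SPEC =====
def Spec_get_incomplete_lines (lines : List String) (out : List String) : Prop := out = get_incomplete_lines_alt lines
instance (lines : List String) (out : List String) : Decidable (Spec_get_incomplete_lines lines out) := by unfold Spec_get_incomplete_lines; infer_instance

-- ===== CLAIM (what is proved, stated in full; the proofs are below) =====
def Claim_equal_get_incomplete_lines : Prop := ∀ (lines : List String), Dom_get_incomplete_lines lines → Spec_get_incomplete_lines lines (get_incomplete_lines lines)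

-- ===== LEMMAS AND PROOFS =====

def isOpener (c : Char) : Bool := c = '(' ∨ c = '[' ∨ c = '{' ∨ c = '<'
def isCloser (c : Char) : Bool := c = ')' ∨ c = ']' ∨ c = '}' ∨ c = '>'
def isMatch (o c : Char) : Bool :=
  (o = '(' ∧ c = ')') ∨ (o = '[' ∧ c = ']') ∨ (o = '{' ∧ c = '}') ∨ (o = '<' ∧ c = '>')

theorem isBracket_eq (c : Char) : isBracket c = (isOpener c || isCloser c) := by
  rw [Bool.eq_iff_iff]
  simp [isBracket, isOpener, isCloser]
  tauto

theorem is_corrupted_eq (o c : Char) : is_corrupted o c = !isMatch o c := by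
  rw [Bool.eq_iff_iff]
  simp [is_corrupted, isMatch, bne]
  tauto

-- a non-bracket character leaves A's state unchanged
theorem stepA_id (st : Bool × List Char) (c : Char) (h : isBracket c = false) :
    stepA st c = st := by
  simp [isBracket_eq, isOpener, isCloser] at h
  simp [stepA, h.1, h.2]

theorem scan_filter (l : List Char) : ∀ st,
    List.foldl stepA st (l.filter isBracket) = List.foldl stepA st l := by
  induction l with
  | nil => intro st; rfl
  | cons x t ih =>
    intro st
    by_cases h : isBracket x = true
    · simp [h, ih]
    · simp only [Bool.not_eq_true] at h
      simp [h, ih, stepA_id st x h]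

-- a matched pair cancels in A's scan
theorem stepA_cancel (o c : Char) (h : isMatch o c = true) (st : Bool × List Char) :
    stepA (stepA st o) c = st := by
  simp [isMatch] at h
  rcases h with ⟨ho, hc⟩ | ⟨ho, hc⟩ | ⟨ho, hc⟩ | ⟨ho, hc⟩ <;>
    subst ho <;> subst hc <;>
    cases st with
    | mk b stack => simp [stepA, is_corrupted]

theorem scan_replacePair : ∀ (o c : Char), isMatch o c = true →
    ∀ (s : List Char) (st), List.foldl stepA st (replacePair o c s) = List.foldl stepA st s
  | _, _, _, [], _ => rfl
  | _, _, _, [x], _ => rfl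
  | o, c, h, x :: y :: t, st => by
    unfold replacePair
    split
    · rename_i hxy
      obtain ⟨hx, hy⟩ := hxy
      subst hx; subst hy
      rw [scan_replacePair x y h t st]
      simp [List.foldl, stepA_cancel x y h st]
    · simp only [List.foldl]
      exact scan_replacePair o c h (y :: t) (stepA st x)

theorem scan_reduceOnce (s : List Char) (st : Bool × List Char) :
    List.foldl stepA st (reduceOnce s) = List.foldl stepA st s := by
  unfold reduceOnce
  rw [scan_replacePair '<' '>' (by decide), scan_replacePair '{' '}' (by decide),
    scan_replacePair '[' ']' (by decide), scan_replacePair '(' ')' (by decide)]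

theorem scan_reduce (s : List Char) (st : Bool × List Char) :
    List.foldl stepA st (reduce s) = List.foldl stepA st s := by
  unfold reduce
  split
  · rfl
  · rw [scan_reduce (reduceOnce s) st, scan_reduceOnce]
termination_by s.length
decreasing_by
  exact Nat.lt_of_le_of_ne ((reduceOnce_sublist s).length_le)
    (fun h => ‹¬ _› ((reduceOnce_sublist s).eq_of_length h))

theorem reduce_fix (s : List Char) : reduceOnce (reduce s) = reduce s := by
  unfold reduce
  split
  · assumption
  · exact reduce_fix (reduceOnce s)
termination_by s.length
decreasing_by
  exact Nat.lt_of_le_of_ne ((reduceOnce_sublist s).length_le)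
    (fun h => ‹¬ _› ((reduceOnce_sublist s).eq_of_length h))

-- `no adjacent (o, c) occurrence`
def noAdjPair (o c : Char) : List Char → Bool
  | x :: y :: t => !(x = o ∧ y = c) && noAdjPair o c (y :: t)
  | _ => true

theorem fix_noAdjPair (o c : Char) : ∀ s : List Char, replacePair o c s = s → noAdjPair o c s = true
  | [], _ => rfl
  | [x], _ => rfl
  | x :: y :: t, h => by
    unfold replacePair at h
    split at h
    · exfalso
      have hle := (replacePair_sublist o c t).length_le
      have := congrArg List.length h
      simp at this
      omega
    · rename_i hxy
      simp only [List.cons.injEq, true_and] at h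
      simp [noAdjPair, hxy, fix_noAdjPair o c (y :: t) h]

theorem noAdjPair_boundary (o c : Char) : ∀ (w : List Char) (x y : Char) (v : List Char),
    noAdjPair o c (w ++ x :: y :: v) = true → ¬(x = o ∧ y = c)
  | [], x, y, v, h => by simp [noAdjPair] at h; tauto
  | [a], x, y, v, h => by
    simp only [List.cons_append, List.nil_append, noAdjPair, Bool.and_eq_true] at h
    intro hxy
    simp [hxy.1, hxy.2] at h
  | a :: b :: w, x, y, v, h => by
    simp only [List.cons_append, noAdjPair, Bool.and_eq_true] at h
    exact noAdjPair_boundary o c (b :: w) x y v (by simpa using h.2)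

-- any fixpoint of reduceOnce is fixed by each of the four replacePair stages
theorem fix_each (r : List Char) (h4 : reduceOnce r = r) :
    replacePair '(' ')' r = r ∧ replacePair '[' ']' r = r ∧
    replacePair '{' '}' r = r ∧ replacePair '<' '>' r = r := by
  unfold reduceOnce at h4
  have e1 : replacePair '(' ')' r = r := by
    refine (replacePair_sublist _ _ _).eq_of_length ?_
    have h1 := (replacePair_sublist '(' ')' r).length_le
    have h2 := (replacePair_sublist '[' ']' (replacePair '(' ')' r)).length_le
    have h3 := (replacePair_sublist '{' '}' (replacePair '[' ']' (replacePair '(' ')' r))).length_le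
    have h4l := (replacePair_sublist '<' '>' (replacePair '{' '}' (replacePair '[' ']' (replacePair '(' ')' r)))).length_le
    have hh := congrArg List.length h4
    omega
  rw [e1] at h4
  have e2 : replacePair '[' ']' r = r := by
    refine (replacePair_sublist _ _ _).eq_of_length ?_
    have h2 := (replacePair_sublist '[' ']' r).length_le
    have h3 := (replacePair_sublist '{' '}' (replacePair '[' ']' r)).length_le
    have h4l := (replacePair_sublist '<' '>' (replacePair '{' '}' (replacePair '[' ']' r))).length_le
    have hh := congrArg List.length h4
    omega
  rw [e2] at h4
  have e3 : replacePair '{' '}' r = r := by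
    refine (replacePair_sublist _ _ _).eq_of_length ?_
    have h3 := (replacePair_sublist '{' '}' r).length_le
    have h4l := (replacePair_sublist '<' '>' (replacePair '{' '}' r)).length_le
    have hh := congrArg List.length h4
    omega
  rw [e3] at h4
  exact ⟨e1, e2, e3, h4⟩

-- once corrupted, always corrupted
theorem scan_mono (l : List Char) : ∀ st : List Char, (List.foldl stepA (true, st) l).1 = true := by
  induction l with
  | nil => intro st; rfl
  | cons x t ih =>
    intro st
    have h1 : (stepA (true, st) x).1 = true := by
      unfold stepA
      split
      · rfl
      · split
        · cases st <;> simp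
        · rfl
    rcases hst : stepA (true, st) x with ⟨b, st'⟩
    rw [hst] at h1
    simp only [] at h1
    subst h1
    simp [List.foldl, hst, ih st']

-- scanning a run of openers just pushes them
theorem scan_openers (u : List Char) (hu : ∀ x ∈ u, isOpener x = true) :
    ∀ (b : Bool) (st : List Char), List.foldl stepA (b, st) u = (b, u.reverse ++ st) := by
  induction u with
  | nil => intro b st; rfl
  | cons x t ih =>
    intro b st
    have hx : isOpener x = true := hu x (by simp)
    have hx' := hx
    simp only [isOpener, decide_eq_true_eq] at hx'
    have hstep : stepA (b, st) x = (b, x :: st) := by simp [stepA, hx']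
    simp [List.foldl, hstep, ih (fun y hy => hu y (by simp [hy])), List.reverse_cons]

-- main per-line lemma: A's corrupted flag equals B's surviving-closer test

theorem reduce_sublist (s : List Char) : (reduce s).Sublist s := by
  unfold reduce
  split
  · exact List.Sublist.refl s
  · exact (reduce_sublist (reduceOnce s)).trans (reduceOnce_sublist s)
termination_by s.length
decreasing_by
  exact Nat.lt_of_le_of_ne ((reduceOnce_sublist s).length_le)
    (fun h => ‹¬ _› ((reduceOnce_sublist s).eq_of_length h))

theorem line_flag (l : List Char) :
    (List.foldl stepA (false, []) l).1 =
    [')', ']', '}', '>'].any (fun c => (reduce (l.filter isBracket)).contains c) := by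
  rw [← scan_filter l (false, []), ← scan_reduce (l.filter isBracket) (false, [])]
  generalize hr : reduce (l.filter isBracket) = r
  have hbr : ∀ x ∈ r, isBracket x = true := by
    intro x hx
    have hx' : x ∈ l.filter isBracket := (hr ▸ reduce_sublist (l.filter isBracket)).subset hx
    exact (List.mem_filter.mp hx').2
  have hfix := fix_each r (hr ▸ reduce_fix (l.filter isBracket))
  have na1 := fix_noAdjPair '(' ')' r hfix.1
  have na2 := fix_noAdjPair '[' ']' r hfix.2.1
  have na3 := fix_noAdjPair '{' '}' r hfix.2.2.1
  have na4 := fix_noAdjPair '<' '>' r hfix.2.2.2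
  have htd : r.takeWhile isOpener ++ r.dropWhile isOpener = r := List.takeWhile_append_dropWhile
  have hu : ∀ x ∈ r.takeWhile isOpener, isOpener x = true := fun x hx => List.mem_takeWhile_imp hx
  cases hv : r.dropWhile isOpener with
  | nil =>
    -- no closer survives: every char of r is an opener, A's scan just pushes
    rw [hv, List.append_nil] at htd
    have hop : ∀ x ∈ r, isOpener x = true := by
      intro x hx
      rw [← htd] at hx
      exact hu x hx
    have hl : (List.foldl stepA (false, []) r).1 = false := by
      rw [scan_openers r hop false []]
    have hrny : ([')', ']', '}', '>'].any (fun c => r.contains c)) = false := by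
      rw [List.any_eq_false]
      intro c' hc'
      simp only [Bool.not_eq_true]
      rw [← Bool.not_eq_true, List.contains_iff_mem]
      intro hmem
      have := hop c' hmem
      fin_cases hc' <;> simp [isOpener] at this
    rw [hl, hrny]
  | cons c0 v' =>
    -- a closer survives the reduction: A's scan must flag corruption
    have hc0op : isOpener c0 = false := by
      have := List.head?_dropWhile_not isOpener r
      rw [hv] at this; simpa using this
    have hc0r : c0 ∈ r := htd ▸ (by rw [hv]; exact List.mem_append_right _ (by simp))
    have hc0cl : isCloser c0 = true := by
      have := hbr c0 hc0r
      rw [isBracket_eq, hc0op] at this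
      simpa using this
    have hrhs : ([')', ']', '}', '>'].any (fun c => r.contains c)) = true := by
      rw [List.any_eq_true]
      have hcm : r.contains c0 = true := List.contains_iff_mem.mpr hc0r
      simp only [isCloser, decide_eq_true_eq] at hc0cl
      rcases hc0cl with h | h | h | h <;> subst h <;>
        exact ⟨_, by simp, hcm⟩
    rw [hrhs]
    -- A's scan on r = openers u ++ c0 :: v'
    conv_lhs => rw [← htd, hv]
    rw [List.foldl_append, scan_openers _ hu false []]
    have hcl' : c0 = ')' ∨ c0 = ']' ∨ c0 = '}' ∨ c0 = '>' := by
      simpa [isCloser] using hc0cl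
    have hnop : ¬(c0 = '(' ∨ c0 = '[' ∨ c0 = '{' ∨ c0 = '<') := by
      simpa [isOpener] using hc0op
    cases hrev : (r.takeWhile isOpener).reverse with
    | nil =>
      -- empty stack meets a closer
      simp only [List.append_nil, List.foldl_cons]
      have hstep : stepA (false, []) c0 = (true, []) := by
        unfold stepA
        rw [if_neg hnop, if_pos hcl']
      rw [hstep, scan_mono]
    | cons o w =>
      -- stack top is the opener just before c0 in r; no adjacent pair ⇒ mismatch
      simp only [List.append_nil]
      have ho : isOpener o = true := by
        have : o ∈ (r.takeWhile isOpener).reverse := by rw [hrev]; simp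
        exact hu o (List.mem_reverse.mp this)
      have hu_eq : r.takeWhile isOpener = w.reverse ++ [o] := by
        have := congrArg List.reverse hrev
        simpa using this
      have hnomatch : isMatch o c0 = false := by
        rw [← Bool.not_eq_true]
        intro hm
        simp only [isMatch, decide_eq_true_eq] at hm
        have hadj : r = w.reverse ++ o :: c0 :: v' := by rw [← htd, hv, hu_eq]; simp
        rcases hm with ⟨h1, h2⟩ | ⟨h1, h2⟩ | ⟨h1, h2⟩ | ⟨h1, h2⟩ <;> subst h1 <;> subst h2
        · exact noAdjPair_boundary '(' ')' w.reverse '(' ')' v' (hadj ▸ na1) ⟨rfl, rfl⟩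
        · exact noAdjPair_boundary '[' ']' w.reverse '[' ']' v' (hadj ▸ na2) ⟨rfl, rfl⟩
        · exact noAdjPair_boundary '{' '}' w.reverse '{' '}' v' (hadj ▸ na3) ⟨rfl, rfl⟩
        · exact noAdjPair_boundary '<' '>' w.reverse '<' '>' v' (hadj ▸ na4) ⟨rfl, rfl⟩
      simp only [List.foldl_cons]
      have hstep : stepA (false, o :: w) c0 = (true, w) := by
        unfold stepA
        rw [if_neg hnop, if_pos hcl']
        simp [is_corrupted_eq, hnomatch]
      rw [hstep, scan_mono]

-- ===== VERDICT (by name: the statement is the Claim_ definition above) =====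
theorem get_incomplete_lines_spec : Claim_equal_get_incomplete_lines := by
  intro lines _
  unfold Spec_get_incomplete_lines get_incomplete_lines get_incomplete_lines_alt
  have hfun : (fun (rv : List String) (line : String) =>
      if (line.toList.foldl stepA (false, [])).1 then rv else rv ++ [line]) =
      (fun (rv : List String) (line : String) =>
        let s := reduce (line.toList.filter isBracket)
        if [')', ']', '}', '>'].any (fun c => s.contains c) then rv else rv ++ [line]) := by
    funext rv line
    simp only [line_flag]
  rw [hfun]
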